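-- pv_equiv track=rewrite | github.com/Percobain/KJSCE | SEM-1/Python Programming/My Own Doings/idk.py/file.py | cut_digits_and_replace
-- ===== SOURCE A (Python) =====
-- def cut_digits_and_replace(text):
--     cut_digits = ''
--     new_text = ''
--
--     for char in text:
--         if char.isdigit():
--             cut_digits += char
--             new_text += 'X'
--         else:
--             new_text += char
--
--     return new_text, cut_digits
-- ===== SOURCE B (Python) =====
-- _XTAB = str.maketrans('0123456789', 'XXXXXXXXXX')
--
-- def cut_digits_and_replace(text):
--     new_text = text.translate(_XTAB)
--     cut_digits = ''.join(c for c in text if '0' <= c <= '9')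
--     return new_text, cut_digits
-- ===== Notes on version B (the rewrite author's own statement) =====
-- stated objective: alternative
-- what changed: Replaces A's single loop growing two accumulator strings and testing isdigit per character by a precomputed translation table (str.maketrans/str.translate) applied in one table-driven pass, plus a separate range-comparison filter that collects the digits; no isdigit call and no interleaved accumulators remain.
import Mathlib
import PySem

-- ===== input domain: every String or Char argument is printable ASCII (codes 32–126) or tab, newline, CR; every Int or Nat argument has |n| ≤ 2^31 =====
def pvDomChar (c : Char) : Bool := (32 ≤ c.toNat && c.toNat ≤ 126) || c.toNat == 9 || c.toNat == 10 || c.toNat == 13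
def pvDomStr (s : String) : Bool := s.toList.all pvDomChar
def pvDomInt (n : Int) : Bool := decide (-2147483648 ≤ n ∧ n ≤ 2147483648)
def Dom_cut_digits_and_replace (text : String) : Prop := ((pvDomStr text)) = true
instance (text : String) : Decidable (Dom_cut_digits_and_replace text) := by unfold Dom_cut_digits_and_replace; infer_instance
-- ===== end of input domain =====

-- B replaces A's interleaved two-accumulator loop by a precomputed digit→'X' translation table
-- (str.maketrans/str.translate) plus a range-comparison filter for the digits; objective: alternative.

-- ===== PORT A =====
-- one pass, two growing accumulators (cut_digits, new_text), exactly A's loop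
def cut_digits_and_replace (text : String) : String × String :=
  let st := text.toList.foldl
    (fun (acc : List Char × List Char) char =>
      if PySem.Chars.isdigit char then (acc.1 ++ [char], acc.2 ++ ['X'])
      else (acc.1, acc.2 ++ [char]))
    ([], [])
  (String.ofList st.2, String.ofList st.1)

-- ===== PORT B =====
-- the str.maketrans('0123456789', 'XXXXXXXXXX') table of Source B
def xtab : List (Char × Char) :=
  [('0','X'),('1','X'),('2','X'),('3','X'),('4','X'),('5','X'),('6','X'),('7','X'),('8','X'),('9','X')]

-- text.translate(_XTAB): per-character table lookup (identity when absent);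
-- cut_digits: filter by the range comparison '0' <= c <= '9'
def cut_digits_and_replace_alt (text : String) : String × String :=
  (String.ofList (text.toList.map (fun c => ((xtab.lookup c).getD c))),
   String.ofList (text.toList.filter (fun c => decide ('0' ≤ c) && decide (c ≤ '9'))))

-- ===== PRECONDITION & SPEC =====
def Spec_cut_digits_and_replace (text : String) (out : String × String) : Prop := out = cut_digits_and_replace_alt text
instance (text : String) (out : String × String) : Decidable (Spec_cut_digits_and_replace text out) := by unfold Spec_cut_digits_and_replace; infer_instance

-- ===== CLAIM (what is proved, stated in full; the proofs are below) =====
def Claim_equal_cut_digits_and_replace : Prop := ∀ (text : String), Dom_cut_digits_and_replace text → Spec_cut_digits_and_replace text (cut_digits_and_replace text)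

-- ===== LEMMAS AND PROOFS =====

-- A's loop computes (filter isdigit, map (digit ↦ 'X'))
theorem cut_digits_foldl_inv (l : List Char) (a b : List Char) :
    l.foldl (fun (acc : List Char × List Char) char =>
      if PySem.Chars.isdigit char then (acc.1 ++ [char], acc.2 ++ ['X'])
      else (acc.1, acc.2 ++ [char])) (a, b)
    = (a ++ l.filter (fun c => PySem.Chars.isdigit c),
       b ++ l.map (fun c => if PySem.Chars.isdigit c then 'X' else c)) := by
  induction l generalizing a b with
  | nil => simp
  | cons c l ih =>
      simp only [List.foldl_cons, List.filter_cons, List.map_cons]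
      by_cases h : PySem.Chars.isdigit c = true <;> simp [h, ih]

-- a digit character is one of the ten literals
theorem char_digit_cases (c : Char) (h0 : '0' ≤ c) (h9 : c ≤ '9') :
    c = '0' ∨ c = '1' ∨ c = '2' ∨ c = '3' ∨ c = '4' ∨
    c = '5' ∨ c = '6' ∨ c = '7' ∨ c = '8' ∨ c = '9' := by
  have hlo : 48 ≤ c.toNat := h0
  have hhi : c.toNat ≤ 57 := h9
  have key : ∀ n : ℕ, n = c.toNat → 48 ≤ n → n ≤ 57 →
      c = '0' ∨ c = '1' ∨ c = '2' ∨ c = '3' ∨ c = '4' ∨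
      c = '5' ∨ c = '6' ∨ c = '7' ∨ c = '8' ∨ c = '9' := by
    intro n hn h48 h57
    have hc : c = Char.ofNat n := by
      rw [hn, Char.ofNat_toNat]
    interval_cases n <;> subst hc <;> simp
  exact key c.toNat rfl hlo hhi

-- the table lookup agrees with A's branch on every character
theorem lookup_xtab (c : Char) :
    ((xtab.lookup c).getD c) = if PySem.Chars.isdigit c then 'X' else c := by
  by_cases h : PySem.Chars.isdigit c = true
  · have hd := h
    unfold PySem.Chars.isdigit at hd
    simp only [Bool.and_eq_true, decide_eq_true_eq] at hd
    rcases char_digit_cases c hd.1 hd.2 with h'|h'|h'|h'|h'|h'|h'|h'|h'|h' <;>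
      subst h' <;> decide
  · have hn : ∀ d : Char, PySem.Chars.isdigit d = false → xtab.lookup d = none := by
      intro d hdf
      unfold PySem.Chars.isdigit at hdf
      simp only [Bool.and_eq_false_iff, decide_eq_false_iff_not] at hdf
      have hne : ∀ x : Char, x = '0' ∨ x = '1' ∨ x = '2' ∨ x = '3' ∨ x = '4' ∨
          x = '5' ∨ x = '6' ∨ x = '7' ∨ x = '8' ∨ x = '9' → d ≠ x := by
        rintro x hx rfl
        rcases hx with h'|h'|h'|h'|h'|h'|h'|h'|h'|h' <;> subst h' <;>
          rcases hdf with hf | hf <;> exact hf (by decide)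
      have f : ∀ x : Char, d ≠ x → (d == x) = false := fun x hx => beq_eq_false_iff_ne.mpr hx
      simp [xtab, List.lookup,
        f '0' (hne '0' (by simp)), f '1' (hne '1' (by simp)), f '2' (hne '2' (by simp)),
        f '3' (hne '3' (by simp)), f '4' (hne '4' (by simp)), f '5' (hne '5' (by simp)),
        f '6' (hne '6' (by simp)), f '7' (hne '7' (by simp)), f '8' (hne '8' (by simp)),
        f '9' (hne '9' (by simp))]
    rw [hn c (by simpa using h)]
    simp [h]

-- ===== VERDICT (by name: the statement is the Claim_ definition above) =====
theorem cut_digits_and_replace_spec : Claim_equal_cut_digits_and_replace := by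
  intro text _
  unfold Spec_cut_digits_and_replace cut_digits_and_replace cut_digits_and_replace_alt
  simp only [cut_digits_foldl_inv, List.nil_append]
  refine Prod.ext ?_ ?_
  · simp [lookup_xtab]
  · simp [PySem.Chars.isdigit]
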